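-- pv_equiv track=rewrite | github.com/jtladner/Modules | seqtools.py | findIndels
-- ===== SOURCE A (Python) =====
-- def findIndels(seq1, seq2):
-- 	insD = {}
-- 	delD = {}
--
-- 	currDel = 0
-- 	currIns = 0
--
-- 	refPos = -1
--
-- 	for i, b1 in enumerate(seq1):
-- 		b2 = seq2[i]
--
-- 		# Deletion
-- 		if b1 != "-" and b2 == "-":
-- 			refPos+=1
-- 			if currIns:
-- 				insD[refPos-currIns] = currIns
-- 				currIns = 0
-- 			currDel+=1
--
-- 		# Insertion
-- 		elif b1 == "-" and b2 != "-":
-- 			if currDel: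
-- 				delD[refPos-currDel] = currDel
-- 				currDel = 0
-- 			currIns+=1
--
-- 		else:
-- 			refPos+=1
-- 			if currIns:
-- 				insD[refPos-currIns] = currIns
-- 				currIns = 0
--
-- 			if currDel:
-- 				delD[refPos-currDel] = currDel
-- 				currDel = 0
--
-- 	# In case there's an indel at the very end of the alignment
-- 	if currIns:
-- 		insD[i-currIns+1] = currIns
--
-- 	if currDel:
-- 		delD[i-currDel+1] = currDel
--
-- 	return insD, delD
-- ===== SOURCE B (Python) =====
-- def findIndels(seq1, seq2):
--     insD = {}
--     delD = {}
--     # insertion pass: refPos counts reference-consuming (non-insertion) columns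
--     refPos = -1
--     run = 0
--     for b1, b2 in zip(seq1, seq2):
--         if b1 == "-" and b2 != "-":
--             run += 1
--         else:
--             refPos += 1
--             if run:
--                 insD[refPos - run] = run
--                 run = 0
--     if run:
--         insD[len(seq1) - run] = run
--     # deletion pass: same reference counter, collecting runs of gaps in seq2
--     refPos = -1
--     run = 0
--     for b1, b2 in zip(seq1, seq2):
--         if b1 != "-" and b2 == "-":
--             refPos += 1
--             run += 1
--         else:
--             if b1 != "-" or b2 == "-":
--                 refPos += 1
--             if run:
--                 delD[refPos - run] = run
--                 run = 0
--     if run: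
--         delD[len(seq1) - run] = run
--     return insD, delD
-- ===== Notes on version B (the rewrite author's own statement) =====
-- stated objective: alternative
-- what changed: B replaces A's single interleaved state machine (index-based loop with two pending counters that cross-flush each other) with two independent passes over the zipped column pairs, one collecting insertion runs and one collecting deletion runs, each carrying only one run counter.
import Mathlib
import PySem

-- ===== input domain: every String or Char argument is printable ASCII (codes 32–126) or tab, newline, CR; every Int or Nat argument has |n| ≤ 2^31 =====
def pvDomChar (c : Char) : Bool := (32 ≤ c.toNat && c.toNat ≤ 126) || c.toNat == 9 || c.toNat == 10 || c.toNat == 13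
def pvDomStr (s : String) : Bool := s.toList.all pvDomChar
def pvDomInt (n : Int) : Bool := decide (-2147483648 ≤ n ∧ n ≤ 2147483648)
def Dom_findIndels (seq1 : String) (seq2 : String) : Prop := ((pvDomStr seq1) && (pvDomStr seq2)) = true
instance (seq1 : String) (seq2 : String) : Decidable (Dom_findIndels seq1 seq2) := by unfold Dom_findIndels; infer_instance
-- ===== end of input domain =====

-- B replaces A's single interleaved state machine (two pending counters that cross-flush
-- each other) with two independent passes over the zipped columns, one per indel kind
-- (objective: alternative, same cost).

-- ===== PORT A =====
-- state: (insD, delD, currDel, currIns, refPos, i)  — i is the leftover loop variable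
def findIndelsStep (seq2 : String)
    (st : PySem.Dict Int Int × PySem.Dict Int Int × Int × Int × Int × Int)
    (p : Int × Char) :
    PySem.Dict Int Int × PySem.Dict Int Int × Int × Int × Int × Int :=
  let (insD, delD, currDel, currIns, refPos, _) := st
  let (i, b1) := p
  match PySem.Str.pyGet? seq2 i with
  | none => (insD, delD, currDel, currIns, refPos, i)   -- IndexError: excluded by Pre_
  | some b2 =>
    if b1 ≠ '-' ∧ b2 = '-' then
      -- Deletion
      let refPos := refPos + 1
      let (insD, currIns) :=
        if currIns ≠ 0 then (insD.insert (refPos - currIns) currIns, 0) else (insD, currIns)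
      (insD, delD, currDel + 1, currIns, refPos, i)
    else if b1 = '-' ∧ b2 ≠ '-' then
      -- Insertion
      let (delD, currDel) :=
        if currDel ≠ 0 then (delD.insert (refPos - currDel) currDel, 0) else (delD, currDel)
      (insD, delD, currDel, currIns + 1, refPos, i)
    else
      let refPos := refPos + 1
      let (insD, currIns) :=
        if currIns ≠ 0 then (insD.insert (refPos - currIns) currIns, 0) else (insD, currIns)
      let (delD, currDel) :=
        if currDel ≠ 0 then (delD.insert (refPos - currDel) currDel, 0) else (delD, currDel)
      (insD, delD, currDel, currIns, refPos, i)

def findIndels (seq1 : String) (seq2 : String) : (List (Int × Int)) × (List (Int × Int)) :=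
  let st := (PySem.List.enumerate seq1.toList 0).foldl (findIndelsStep seq2)
              (PySem.Dict.empty, PySem.Dict.empty, 0, 0, -1, 0)
  let (insD, delD, currDel, currIns, _, i) := st
  -- In case there's an indel at the very end of the alignment
  let insD := if currIns ≠ 0 then insD.insert (i - currIns + 1) currIns else insD
  let delD := if currDel ≠ 0 then delD.insert (i - currDel + 1) currDel else delD
  (insD.items, delD.items)

-- ===== PORT B =====
-- Source B's insertion pass: state (insD, refPos, run)
def pvInsStep (st : PySem.Dict Int Int × Int × Int) (p : Char × Char) :
    PySem.Dict Int Int × Int × Int :=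
  let (d, refPos, run) := st
  if p.1 = '-' ∧ p.2 ≠ '-' then (d, refPos, run + 1)
  else
    let refPos := refPos + 1
    if run ≠ 0 then (d.insert (refPos - run) run, refPos, 0) else (d, refPos, run)

-- Source B's deletion pass: state (delD, refPos, run)
def pvDelStep (st : PySem.Dict Int Int × Int × Int) (p : Char × Char) :
    PySem.Dict Int Int × Int × Int :=
  let (d, refPos, run) := st
  if p.1 ≠ '-' ∧ p.2 = '-' then (d, refPos + 1, run + 1)
  else
    let refPos := if p.1 ≠ '-' ∨ p.2 = '-' then refPos + 1 else refPos
    if run ≠ 0 then (d.insert (refPos - run) run, refPos, 0) else (d, refPos, run)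

def findIndels_alt (seq1 : String) (seq2 : String) : (List (Int × Int)) × (List (Int × Int)) :=
  let ps := seq1.toList.zip seq2.toList
  let (insD, _, runI) := ps.foldl pvInsStep (PySem.Dict.empty, -1, 0)
  let insD := if runI ≠ 0 then insD.insert (PySem.Str.len seq1 - runI) runI else insD
  let (delD, _, runD) := ps.foldl pvDelStep (PySem.Dict.empty, -1, 0)
  let delD := if runD ≠ 0 then delD.insert (PySem.Str.len seq1 - runD) runD else delD
  (insD.items, delD.items)

-- ===== PRECONDITION & SPEC =====
-- Pre_ excludes exactly the inputs where A raises IndexError (seq2 shorter than seq1).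
def Pre_findIndels (seq1 : String) (seq2 : String) : Prop :=
  seq1.toList.length ≤ seq2.toList.length
instance (seq1 : String) (seq2 : String) : Decidable (Pre_findIndels seq1 seq2) := by
  unfold Pre_findIndels; infer_instance

def pvWitness_findIndels : String × String := ("AC-G", "A-CG")

def Spec_findIndels (seq1 : String) (seq2 : String) (out : (List (Int × Int)) × (List (Int × Int))) : Prop := out = findIndels_alt seq1 seq2
instance (seq1 : String) (seq2 : String) (out : (List (Int × Int)) × (List (Int × Int))) : Decidable (Spec_findIndels seq1 seq2 out) := by unfold Spec_findIndels; infer_instance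

-- ===== CLAIM (what is proved, stated in full; the proof is below) =====
def Claim_equal_findIndels : Prop := ∀ (seq1 : String) (seq2 : String), Dom_findIndels seq1 seq2 → Pre_findIndels seq1 seq2 → Spec_findIndels seq1 seq2 (findIndels seq1 seq2)

-- ===== LEMMAS AND PROOFS =====

-- per-column classification (proof-side view of the branch conditions)
def pvKind (b1 b2 : Char) : Char :=
  if b1 = '-' ∧ b2 ≠ '-' then 'I'
  else if b1 ≠ '-' ∧ b2 = '-' then 'D'
  else 'M'

-- A's loop, re-expressed over the column-classification list (no index, no seq2 lookups)
def pvSimA : List Char → (PySem.Dict Int Int × PySem.Dict Int Int × Int × Int × Int) →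
    PySem.Dict Int Int × PySem.Dict Int Int × Int × Int × Int
  | [], st => st
  | c :: cs, (insD, delD, currDel, currIns, refPos) =>
    if c = 'D' then
      let refPos := refPos + 1
      let (insD, currIns) :=
        if currIns ≠ 0 then (insD.insert (refPos - currIns) currIns, 0) else (insD, currIns)
      pvSimA cs (insD, delD, currDel + 1, currIns, refPos)
    else if c = 'I' then
      let (delD, currDel) :=
        if currDel ≠ 0 then (delD.insert (refPos - currDel) currDel, 0) else (delD, currDel)
      pvSimA cs (insD, delD, currDel, currIns + 1, refPos)
    else
      let refPos := refPos + 1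
      let (insD, currIns) :=
        if currIns ≠ 0 then (insD.insert (refPos - currIns) currIns, 0) else (insD, currIns)
      let (delD, currDel) :=
        if currDel ≠ 0 then (delD.insert (refPos - currDel) currDel, 0) else (delD, currDel)
      pvSimA cs (insD, delD, currDel, currIns, refPos)

theorem pvBridgeA (seq2 : String) (l1 : List Char) : ∀ (k : Nat)
    (insD delD : PySem.Dict Int Int) (cD cI r i0 : Int),
    k + l1.length ≤ seq2.toList.length →
    (PySem.List.enumerate l1 (k : Int)).foldl (findIndelsStep seq2) (insD, delD, cD, cI, r, i0)
      = (let st5 := pvSimA ((l1.zip (seq2.toList.drop k)).map (fun p => pvKind p.1 p.2))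
                      (insD, delD, cD, cI, r)
         (st5.1, st5.2.1, st5.2.2.1, st5.2.2.2.1, st5.2.2.2.2,
          if l1.isEmpty then i0 else (k : Int) + l1.length - 1)) := by
  induction l1 with
  | nil =>
    intro k insD delD cD cI r i0 h
    simp [PySem.List.enumerate, pvSimA]
  | cons b1 l1' ih =>
    intro k insD delD cD cI r i0 h
    rw [List.length_cons] at h
    have hk : k < seq2.toList.length := by omega
    have hle : (k + 1) + l1'.length ≤ seq2.toList.length := by omega
    have hget : PySem.Str.pyGet? seq2 (k : Int) = some seq2.toList[k] := by
      rw [PySem.Str.pyGet?_natCast, List.getElem?_eq_getElem hk]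
    have hdrop : seq2.toList.drop k = seq2.toList[k] :: seq2.toList.drop (k + 1) :=
      List.drop_eq_getElem_cons hk
    have ih' : ∀ (a : PySem.Dict Int Int) (b : PySem.Dict Int Int) (c d e f : Int),
        (PySem.List.enumerate l1' ((k : Int) + 1)).foldl (findIndelsStep seq2) (a, b, c, d, e, f)
          = (let st5 := pvSimA ((l1'.zip (seq2.toList.drop (k + 1))).map (fun p => pvKind p.1 p.2))
                          (a, b, c, d, e)
             (st5.1, st5.2.1, st5.2.2.1, st5.2.2.2.1, st5.2.2.2.2,
              if l1'.isEmpty then f else (k : Int) + 1 + l1'.length - 1)) := by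
      intro a b c d e f
      have hh := ih (k + 1) a b c d e f hle
      rw [show (((k + 1 : ℕ)) : Int) = (k : Int) + 1 by push_cast; ring] at hh
      exact hh
    rw [PySem.List.enumerate_cons, List.foldl_cons, hdrop, List.zip_cons_cons, List.map_cons]
    by_cases hb1 : b1 = '-' <;> by_cases hb2 : seq2.toList[k] = '-'
    · -- gap-gap column: class 'M'
      have hkl : pvKind b1 seq2.toList[k] = 'M' := by simp [pvKind, hb1, hb2]
      rw [hkl]
      simp only [findIndelsStep, hget]
      rw [if_neg (fun hc => hc.1 hb1), if_neg (fun hc => hc.2 hb2)]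
      simp only [pvSimA, Char.reduceEq, reduceIte]
      rw [ih']
      simp only [List.isEmpty_cons, List.length_cons, Bool.false_eq_true, if_false]
      have hlast : (if l1'.isEmpty then ((k : Int)) else (k : Int) + 1 + (l1'.length : Int) - 1)
          = (k : Int) + ((l1'.length + 1 : ℕ) : Int) - 1 := by
        by_cases hE : l1'.isEmpty
        · rw [List.isEmpty_iff.mp hE]; simp
        · simp only [hE, Bool.false_eq_true, if_false]; push_cast; ring
      rw [hlast]
    · -- insertion column: class 'I'
      have hkl : pvKind b1 seq2.toList[k] = 'I' := by simp [pvKind, hb1, hb2]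
      rw [hkl]
      simp only [findIndelsStep, hget]
      rw [if_neg (fun hc => hc.1 hb1), if_pos ⟨hb1, hb2⟩]
      simp only [pvSimA, Char.reduceEq, reduceIte]
      rw [ih']
      simp only [List.isEmpty_cons, List.length_cons, Bool.false_eq_true, if_false]
      have hlast : (if l1'.isEmpty then ((k : Int)) else (k : Int) + 1 + (l1'.length : Int) - 1)
          = (k : Int) + ((l1'.length + 1 : ℕ) : Int) - 1 := by
        by_cases hE : l1'.isEmpty
        · rw [List.isEmpty_iff.mp hE]; simp
        · simp only [hE, Bool.false_eq_true, if_false]; push_cast; ring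
      rw [hlast]
    · -- deletion column: class 'D'
      have hkl : pvKind b1 seq2.toList[k] = 'D' := by simp [pvKind, hb1, hb2]
      rw [hkl]
      simp only [findIndelsStep, hget]
      rw [if_pos ⟨hb1, hb2⟩]
      simp only [pvSimA, Char.reduceEq, reduceIte]
      rw [ih']
      simp only [List.isEmpty_cons, List.length_cons, Bool.false_eq_true, if_false]
      have hlast : (if l1'.isEmpty then ((k : Int)) else (k : Int) + 1 + (l1'.length : Int) - 1)
          = (k : Int) + ((l1'.length + 1 : ℕ) : Int) - 1 := by
        by_cases hE : l1'.isEmpty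
        · rw [List.isEmpty_iff.mp hE]; simp
        · simp only [hE, Bool.false_eq_true, if_false]; push_cast; ring
      rw [hlast]
    · -- match/mismatch column: class 'M'
      have hkl : pvKind b1 seq2.toList[k] = 'M' := by simp [pvKind, hb1, hb2]
      rw [hkl]
      simp only [findIndelsStep, hget]
      rw [if_neg (fun hc => hb2 hc.2), if_neg (fun hc => hb1 hc.1)]
      simp only [pvSimA, Char.reduceEq, reduceIte]
      rw [ih']
      simp only [List.isEmpty_cons, List.length_cons, Bool.false_eq_true, if_false]
      have hlast : (if l1'.isEmpty then ((k : Int)) else (k : Int) + 1 + (l1'.length : Int) - 1)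
          = (k : Int) + ((l1'.length + 1 : ℕ) : Int) - 1 := by
        by_cases hE : l1'.isEmpty
        · rw [List.isEmpty_iff.mp hE]; simp
        · simp only [hE, Bool.false_eq_true, if_false]; push_cast; ring
      rw [hlast]

-- B's two passes, re-expressed over the classification list
def pvInsC (st : PySem.Dict Int Int × Int × Int) (c : Char) :
    PySem.Dict Int Int × Int × Int :=
  let (d, refPos, run) := st
  if c = 'I' then (d, refPos, run + 1)
  else
    let refPos := refPos + 1
    if run ≠ 0 then (d.insert (refPos - run) run, refPos, 0) else (d, refPos, run)

def pvDelC (st : PySem.Dict Int Int × Int × Int) (c : Char) :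
    PySem.Dict Int Int × Int × Int :=
  let (d, refPos, run) := st
  if c = 'D' then (d, refPos + 1, run + 1)
  else
    let refPos := if c ≠ 'I' then refPos + 1 else refPos
    if run ≠ 0 then (d.insert (refPos - run) run, refPos, 0) else (d, refPos, run)

theorem pvInsStep_kind (st : PySem.Dict Int Int × Int × Int) (p : Char × Char) :
    pvInsStep st p = pvInsC st (pvKind p.1 p.2) := by
  rcases st with ⟨d, r, run⟩
  by_cases h1 : p.1 = '-' <;> by_cases h2 : p.2 = '-' <;>
    simp [pvInsStep, pvInsC, pvKind, h1, h2]

theorem pvDelStep_kind (st : PySem.Dict Int Int × Int × Int) (p : Char × Char) :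
    pvDelStep st p = pvDelC st (pvKind p.1 p.2) := by
  rcases st with ⟨d, r, run⟩
  by_cases h1 : p.1 = '-' <;> by_cases h2 : p.2 = '-' <;>
    simp [pvDelStep, pvDelC, pvKind, h1, h2]

-- the main lemma: A's interleaved machine runs the two passes in lockstep
theorem pvMain : ∀ (cs : List Char) (d1 d2 : PySem.Dict Int Int) (cD cI r : Int),
    pvSimA cs (d1, d2, cD, cI, r)
      = ((cs.foldl pvInsC (d1, r, cI)).1,
         (cs.foldl pvDelC (d2, r, cD)).1,
         (cs.foldl pvDelC (d2, r, cD)).2.2,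
         (cs.foldl pvInsC (d1, r, cI)).2.2,
         (cs.foldl pvInsC (d1, r, cI)).2.1) := by
  intro cs
  induction cs with
  | nil => intro d1 d2 cD cI r; simp [pvSimA]
  | cons c cs ih =>
    intro d1 d2 cD cI r
    by_cases hD : c = 'D'
    · subst hD
      simp only [pvSimA, Char.reduceEq, reduceIte, List.foldl_cons]
      rw [ih]
      simp only [pvInsC, pvDelC, Char.reduceEq, reduceIte, ne_eq]
      split_ifs <;> simp_all
    · by_cases hI : c = 'I'
      · subst hI
        simp only [pvSimA, Char.reduceEq, reduceIte, List.foldl_cons]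
        rw [ih]
        simp only [pvInsC, pvDelC, Char.reduceEq, reduceIte, ne_eq]
        split_ifs <;> simp_all
      · simp only [pvSimA, List.foldl_cons, if_neg hD, if_neg hI]
        rw [ih]
        simp only [pvInsC, pvDelC, if_neg hD, ne_eq, hI, not_false_eq_true, if_true, reduceIte]
        split_ifs <;> simp_all

-- ===== VERDICT (by name: the statement is the Claim_ definition above) =====
theorem findIndels_spec : Claim_equal_findIndels := by
  intro seq1 seq2 _ hpre
  unfold Spec_findIndels
  unfold Pre_findIndels at hpre
  have hfold : ∀ (l : List (Char × Char)) (st : PySem.Dict Int Int × Int × Int),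
      (l.foldl pvInsStep st = (l.map (fun p => pvKind p.1 p.2)).foldl pvInsC st) ∧
      (l.foldl pvDelStep st = (l.map (fun p => pvKind p.1 p.2)).foldl pvDelC st) := by
    intro l
    induction l with
    | nil => intro st; exact ⟨rfl, rfl⟩
    | cons p t iht =>
      intro st
      simp only [List.foldl_cons, List.map_cons, pvInsStep_kind, pvDelStep_kind]
      exact ⟨(iht _).1, (iht _).2⟩
  rcases hl : seq1.toList with _ | ⟨b1, l1'⟩
  · unfold findIndels findIndels_alt
    rw [hl]
    simp [PySem.List.enumerate]
  · unfold findIndels findIndels_alt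
    have hpre' : 0 + (b1 :: l1').length ≤ seq2.toList.length := by
      rw [hl] at hpre; omega
    have hb := pvBridgeA seq2 (b1 :: l1') 0 PySem.Dict.empty PySem.Dict.empty 0 0 (-1) 0 hpre'
    simp only [Nat.cast_zero, List.drop_zero, List.isEmpty_cons, Bool.false_eq_true,
      if_false, List.length_cons] at hb
    rw [hl, hb]
    simp only [(hfold ((b1 :: l1').zip seq2.toList) (PySem.Dict.empty, -1, 0)).1,
        (hfold ((b1 :: l1').zip seq2.toList) (PySem.Dict.empty, -1, 0)).2,
        pvMain, PySem.Str.len_eq, hl]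
    set F := ((b1 :: l1').zip seq2.toList).map (fun p => pvKind p.1 p.2) with hF
    simp only [ne_eq]
    have e2 : ∀ c : Int, (0 : Int) + ((l1'.length + 1 : ℕ) : Int) - 1 - c + 1
        = (((b1 :: l1').length : ℕ) : Int) - c := by
      intro c; simp only [List.length_cons]; push_cast; ring
    simp only [e2, List.length_cons]
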